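-- pv_equiv track=rewrite | github.com/Marketplace-Lompa/media-shopee | app/backend/agent_runtime/capture_engine.py | _garment_capture_affinity
-- ===== SOURCE A (Python) =====
-- def _garment_capture_affinity(user_prompt: str) -> dict[str, str]:
--     text = str(user_prompt or "").lower()
--     affinity = {
--         "garment_priority": "",
--         "capture_feel": "",
--     }
--     if any(token in text for token in ("vestido", "dress", "saia", "skirt", "evasê", "evase", "bufante", "puff")):
--         affinity["garment_priority"] = "favor waist definition, sleeve volume, and movement through the skirt"
--         affinity["capture_feel"] = "softly observational commercial capture"
--     if any(token in text for token in ("blazer", "alfaiat", "structured", "tailored", "lapela", "lapel")):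
--         affinity["garment_priority"] = "favor line, shoulder structure, lapel definition, and tailoring precision"
--         affinity["capture_feel"] = "controlled garment-first capture"
--     if any(token in text for token in ("tricô", "tricot", "knit", "crochet", "crochê", "texture")):
--         affinity["garment_priority"] = "favor texture, surface depth, and stitch readability"
--     return affinity
-- ===== SOURCE B (Python) =====
-- _RULES = [
--     (("vestido", "dress", "saia", "skirt", "evasê", "evase", "bufante", "puff"),
--      "favor waist definition, sleeve volume, and movement through the skirt",
--      "softly observational commercial capture"),
--     (("blazer", "alfaiat", "structured", "tailored", "lapela", "lapel"),
--      "favor line, shoulder structure, lapel definition, and tailoring precision",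
--      "controlled garment-first capture"),
--     (("tricô", "tricot", "knit", "crochet", "crochê", "texture"),
--      "favor texture, surface depth, and stitch readability",
--      None),
-- ]
--
-- def _garment_capture_affinity(user_prompt: str) -> dict[str, str]:
--     text = str(user_prompt or "").lower()
--     matched = [(priority, feel)
--                for tokens, priority, feel in _RULES
--                if any(token in text for token in tokens)]
--     priority = matched[-1][0] if matched else ""
--     feel = next((f for _, f in reversed(matched) if f is not None), "")
--     return {"garment_priority": priority, "capture_feel": feel}
-- ===== Notes on version B (the rewrite author's own statement) =====
-- stated objective: alternative
-- what changed: Replaces A's sequential dict-overwrite branches with a filter of matching rules followed by two independent last-match searches (last match gives the priority, last feel-carrying match gives the feel), building the result dict fresh with no mutation.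
import Mathlib
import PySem

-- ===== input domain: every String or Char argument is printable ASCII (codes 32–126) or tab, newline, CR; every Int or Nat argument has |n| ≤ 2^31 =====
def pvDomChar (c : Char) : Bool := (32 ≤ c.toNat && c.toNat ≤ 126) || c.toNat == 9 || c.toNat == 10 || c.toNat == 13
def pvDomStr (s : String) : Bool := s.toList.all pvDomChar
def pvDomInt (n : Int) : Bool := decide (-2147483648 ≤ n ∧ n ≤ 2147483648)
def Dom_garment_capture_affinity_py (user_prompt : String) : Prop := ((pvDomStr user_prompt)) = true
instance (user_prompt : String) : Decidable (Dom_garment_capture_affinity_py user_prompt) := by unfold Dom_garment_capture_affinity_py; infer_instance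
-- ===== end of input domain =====

-- B replaces A's sequential dict-overwrite branches by filtering the matching rules once and
-- resolving each field with an independent last-match search, building the dict fresh (alternative decomposition; same cost).

-- ===== PORT A =====
def garment_capture_affinity_py (user_prompt : String) : List (String × String) :=
  let text := PySem.Str.lower user_prompt
  let affinity : PySem.Dict String String :=
    (PySem.Dict.empty.insert "garment_priority" "").insert "capture_feel" ""
  let affinity :=
    if (["vestido", "dress", "saia", "skirt", "evasê", "evase", "bufante", "puff"].any
        (fun token => PySem.Str.isIn token text)) then
      (affinity.insert "garment_priority"
        "favor waist definition, sleeve volume, and movement through the skirt").insert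
        "capture_feel" "softly observational commercial capture"
    else affinity
  let affinity :=
    if (["blazer", "alfaiat", "structured", "tailored", "lapela", "lapel"].any
        (fun token => PySem.Str.isIn token text)) then
      (affinity.insert "garment_priority"
        "favor line, shoulder structure, lapel definition, and tailoring precision").insert
        "capture_feel" "controlled garment-first capture"
    else affinity
  let affinity :=
    if (["tricô", "tricot", "knit", "crochet", "crochê", "texture"].any
        (fun token => PySem.Str.isIn token text)) then
      affinity.insert "garment_priority" "favor texture, surface depth, and stitch readability"
    else affinity
  affinity.items

-- ===== PORT B =====
def pvRules : List (List String × String × Option String) :=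
  [ (["vestido", "dress", "saia", "skirt", "evasê", "evase", "bufante", "puff"],
     "favor waist definition, sleeve volume, and movement through the skirt",
     some "softly observational commercial capture"),
    (["blazer", "alfaiat", "structured", "tailored", "lapela", "lapel"],
     "favor line, shoulder structure, lapel definition, and tailoring precision",
     some "controlled garment-first capture"),
    (["tricô", "tricot", "knit", "crochet", "crochê", "texture"],
     "favor texture, surface depth, and stitch readability",
     none) ]

def garment_capture_affinity_py_alt (user_prompt : String) : List (String × String) :=
  let text := PySem.Str.lower user_prompt
  let matched : List (String × Option String) :=
    (pvRules.filter (fun r => r.1.any (fun token => PySem.Str.isIn token text))).map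
      (fun r => (r.2.1, r.2.2))
  let priority := match matched.getLast? with
    | some pf => pf.1
    | none => ""
  let feel := match matched.reverse.find? (fun pf => pf.2.isSome) with
    | some pf => pf.2.getD ""
    | none => ""
  [("garment_priority", priority), ("capture_feel", feel)]

-- ===== PRECONDITION & SPEC =====
def Spec_garment_capture_affinity_py (user_prompt : String) (out : List (String × String)) : Prop := out = garment_capture_affinity_py_alt user_prompt
instance (user_prompt : String) (out : List (String × String)) : Decidable (Spec_garment_capture_affinity_py user_prompt out) := by unfold Spec_garment_capture_affinity_py; infer_instance

-- ===== CLAIM (what is proved, stated in full; the proofs are below) =====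
def Claim_equal_garment_capture_affinity_py : Prop := ∀ (user_prompt : String), Dom_garment_capture_affinity_py user_prompt → Spec_garment_capture_affinity_py user_prompt (garment_capture_affinity_py user_prompt)

-- ===== LEMMAS AND PROOFS =====

-- ===== VERDICT (by name: the statement is the Claim_ definition above) =====
theorem garment_capture_affinity_py_spec : Claim_equal_garment_capture_affinity_py := by
  intro user_prompt _
  unfold Spec_garment_capture_affinity_py garment_capture_affinity_py garment_capture_affinity_py_alt pvRules
  cases h1 : (["vestido", "dress", "saia", "skirt", "evasê", "evase", "bufante", "puff"].any
      (fun token => PySem.Str.isIn token (PySem.Str.lower user_prompt))) <;>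
  cases h2 : (["blazer", "alfaiat", "structured", "tailored", "lapela", "lapel"].any
      (fun token => PySem.Str.isIn token (PySem.Str.lower user_prompt))) <;>
  cases h3 : (["tricô", "tricot", "knit", "crochet", "crochê", "texture"].any
      (fun token => PySem.Str.isIn token (PySem.Str.lower user_prompt))) <;>
  simp only [List.filter, h1, h2, h3] <;> rfl
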